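-- pv_equiv track=rewrite | github.com/dorahb/dsapracs | gridfindlongeststrings.py | find_longest_strings
-- ===== SOURCE A (Python) =====
-- def find_longest_strings(grid):
--     """ Given a grid represented as a list of lists, returns the first word in the grid
--     that has the longest string, or None if no such word occurs.
--     """
--
--     my_list = []
--
--     for word_list in grid:
--         for item in word_list:
--             my_list.append(item)
--
--     if my_list == []:
--         return None
--
--     longest_strings = max(my_list, key = len)
--
--     return longest_strings
-- ===== SOURCE B (Python) =====
-- def find_longest_strings(grid):
--     """ Same result as A: first longest string in the grid, or None.
--     Single streaming pass, no intermediate flattened list. """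
--     best = None
--     for word_list in grid:
--         for item in word_list:
--             if best is None or len(item) > len(best):
--                 best = item
--     return best
-- ===== Notes on version B (the rewrite author's own statement) =====
-- stated objective: simpler
-- what changed: Replaced flatten-into-a-list-then-max(key=len) by a single streaming pass that keeps a running best (strict > preserves first-longest tie-breaking), removing the intermediate list and the separate empty check.
import Mathlib
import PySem

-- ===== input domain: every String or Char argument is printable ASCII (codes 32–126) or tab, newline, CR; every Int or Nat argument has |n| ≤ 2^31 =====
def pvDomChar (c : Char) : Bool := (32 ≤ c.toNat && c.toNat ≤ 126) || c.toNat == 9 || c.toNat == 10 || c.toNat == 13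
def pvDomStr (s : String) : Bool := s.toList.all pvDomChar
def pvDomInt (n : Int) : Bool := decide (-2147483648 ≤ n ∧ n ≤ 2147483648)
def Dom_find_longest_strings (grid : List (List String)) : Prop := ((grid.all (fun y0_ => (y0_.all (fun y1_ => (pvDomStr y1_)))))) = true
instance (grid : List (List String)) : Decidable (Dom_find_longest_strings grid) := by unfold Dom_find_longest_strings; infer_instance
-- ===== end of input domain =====

-- B replaces flatten-then-max(key=len) by one streaming running-best pass (same values; simpler, no intermediate list).

-- ===== PORT A =====
-- my_list = []; for word_list in grid: for item in word_list: my_list.append(item)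
-- if my_list == []: return None;  return max(my_list, key=len)
def find_longest_strings (grid : List (List String)) : Option String :=
  let my_list : List String :=
    grid.foldl (fun acc word_list =>
      word_list.foldl (fun acc2 item => acc2 ++ [item]) acc) []
  if my_list = [] then none
  else PySem.List.max? my_list (fun s => PySem.Str.len s)

-- ===== PORT B =====
-- best = None; for word_list in grid: for item in word_list:
--   if best is None or len(item) > len(best): best = item
-- return best
def find_longest_strings_alt (grid : List (List String)) : Option String :=
  grid.foldl (fun best word_list =>
    word_list.foldl (fun best item =>
      match best with
      | none => some item
      | some b => if PySem.Str.len b < PySem.Str.len item then some item else some b)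
      best) none

-- ===== PRECONDITION & SPEC =====
def Spec_find_longest_strings (grid : List (List String)) (out : Option String) : Prop := out = find_longest_strings_alt grid
instance (grid : List (List String)) (out : Option String) : Decidable (Spec_find_longest_strings grid out) := by unfold Spec_find_longest_strings; infer_instance

-- ===== CLAIM (what is proved, stated in full; the proofs are below) =====
def Claim_equal_find_longest_strings : Prop := ∀ (grid : List (List String)), Dom_find_longest_strings grid → Spec_find_longest_strings grid (find_longest_strings grid)

-- ===== LEMMAS AND PROOFS =====

-- the inner append loop of A builds acc ++ word_list
theorem pv_inner_append (wl : List String) (acc : List String) :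
    wl.foldl (fun a2 item => a2 ++ [item]) acc = acc ++ wl := by
  induction wl generalizing acc with
  | nil => rw [List.foldl_nil, List.append_nil]
  | cons x t ih =>
    rw [List.foldl_cons, ih, List.append_assoc, List.singleton_append]

-- A's my_list is the flatten of the grid
theorem pv_my_list_eq_flatten (grid : List (List String)) (acc : List String) :
    grid.foldl (fun a wl => wl.foldl (fun a2 item => a2 ++ [item]) a) acc
      = acc ++ grid.flatten := by
  induction grid generalizing acc with
  | nil => rw [List.foldl_nil, List.flatten_nil, List.append_nil]
  | cons wl t ih =>
    rw [List.foldl_cons, pv_inner_append, ih, List.flatten_cons, List.append_assoc]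

-- ===== VERDICT (by name: the statement is the Claim_ definition above) =====
theorem find_longest_strings_spec : Claim_equal_find_longest_strings := by
  intro grid _
  show find_longest_strings grid = find_longest_strings_alt grid
  unfold find_longest_strings find_longest_strings_alt
  simp only [pv_my_list_eq_flatten, List.nil_append]
  rw [PySem.List.max?, ← List.foldl_flatten]
  by_cases h : grid.flatten = []
  · rw [if_pos h, h, List.foldl_nil]
  · rw [if_neg h]
    congr 1
    funext a x
    cases a <;> rfl
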